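-- pv_equiv track=rewrite | github.com/JVD9kh96/static-code-analysis | evaluationcodes/Python_scripts/code_11.py | complex_calculation
-- ===== SOURCE A (Python) =====
-- def complex_calculation(x: int) -> int:
--     result = 0
--     if x % 2 == 0:
--         result += 1
--         if x % 3 == 0:
--             result += 2
--         else:
--             for i in range(3):
--                 if i == 0:
--                     result += 3
--                 elif i == 1:
--                     result += 4
--                 else:
--                     result += 5
--     else:
--         result -= 1
--
--     if x > 10 or (x & 1 and x < 0):
--         result += 6
--         while x > 0:
--             if x % 5 == 0:
--                 result += 7
--             if x % 7 == 0:
--                 result += 8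
--             x -= 1
--
--     try:
--         if result < 0:
--             raise ValueError("negative")
--         if result == 0:
--             result = 1
--     except ValueError:
--         result = 0
--     except Exception:
--         result = -1
--
--     for j in range(4):
--         if j % 2 == 0:
--             result += j
--         elif j == 1:
--             result -= j
--         else:
--             result *= j
--
--     if result > 100:
--         result //= 2
--     elif result > 50:
--         result //= 3
--     elif result > 20:
--         result //= 4
--     else:
--         result = result + 10
--
--     return result
-- ===== SOURCE B (Python) =====
-- def complex_calculation(x: int) -> int:
--     # branch arithmetic collapsed to constants; the x>0 counting loop replaced
--     # by the closed form 7*(x//5) + 8*(x//7)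
--     if x % 2 == 0:
--         r = 3 if x % 3 == 0 else 13
--     else:
--         r = -1
--     if x > 10 or (x % 2 != 0 and x < 0):
--         r += 6
--         if x > 0:
--             r += 7 * (x // 5) + 8 * (x // 7)
--     if r < 0:
--         r = 0
--     elif r == 0:
--         r = 1
--     r = (r + 1) * 3
--     if r > 100:
--         return r // 2
--     if r > 50:
--         return r // 3
--     if r > 20:
--         return r // 4
--     return r + 10
-- ===== Notes on version B (the rewrite author's own statement) =====
-- stated objective: faster
-- what changed: The O(x) while-loop counting multiples of 5 and 7 down from x is replaced by the closed form 7*(x//5)+8*(x//7), and the constant-effect for-loops and try/except are collapsed into direct arithmetic.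
import Mathlib
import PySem

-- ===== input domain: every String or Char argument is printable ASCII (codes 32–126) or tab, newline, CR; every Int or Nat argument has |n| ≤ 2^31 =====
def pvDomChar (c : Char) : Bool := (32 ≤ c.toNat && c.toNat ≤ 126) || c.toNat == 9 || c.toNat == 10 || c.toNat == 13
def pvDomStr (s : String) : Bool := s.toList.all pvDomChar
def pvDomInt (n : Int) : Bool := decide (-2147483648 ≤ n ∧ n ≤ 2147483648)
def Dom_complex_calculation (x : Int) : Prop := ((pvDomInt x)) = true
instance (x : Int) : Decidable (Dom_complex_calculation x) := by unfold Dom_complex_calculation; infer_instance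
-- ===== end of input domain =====

-- B replaces A's O(x) counting loop by the closed form 7*(x//5)+8*(x//7) (objective: faster).

-- ===== PORT A =====
-- A's body is transliterated in two pieces: pvHeadA = the parity branch and the
-- 'x > 10 or (x & 1 and x < 0)' block ('x & 1' truthiness ported as x % 2 ≠ 0, exact for ints),
-- pvTailA = the try/except, the range(4) loop and the final division ladder.
def pvWhileA (x result : Int) : Int :=
  if x > 0 then
    let result := if PySem.Int.mod x 5 = 0 then result + 7 else result
    let result := if PySem.Int.mod x 7 = 0 then result + 8 else result
    pvWhileA (x - 1) result
  else result
termination_by x.toNat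
decreasing_by omega

def pvHeadA (x : Int) : Int :=
  let result : Int := 0
  let result :=
    if PySem.Int.mod x 2 = 0 then
      let result := result + 1
      if PySem.Int.mod x 3 = 0 then result + 2
      else (PySem.List.pyRange 0 3 1).foldl
        (fun result i => if i = 0 then result + 3
          else if i = 1 then result + 4 else result + 5) result
    else result - 1
  if x > 10 ∨ (PySem.Int.mod x 2 ≠ 0 ∧ x < 0) then pvWhileA x (result + 6) else result

def pvTailA (result : Int) : Int :=
  -- try/except: the ValueError raised when result < 0 is caught and sets result = 0
  let result := if result < 0 then 0 else if result = 0 then 1 else result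
  let result := (PySem.List.pyRange 0 4 1).foldl
    (fun result j => if PySem.Int.mod j 2 = 0 then result + j
      else if j = 1 then result - j else result * j) result
  if result > 100 then PySem.Int.floordiv result 2
  else if result > 50 then PySem.Int.floordiv result 3
  else if result > 20 then PySem.Int.floordiv result 4
  else result + 10

def complex_calculation (x : Int) : Int := pvTailA (pvHeadA x)

-- ===== PORT B =====
def pvHeadB (x : Int) : Int :=
  let r : Int :=
    if PySem.Int.mod x 2 = 0 then (if PySem.Int.mod x 3 = 0 then 3 else 13) else -1
  if x > 10 ∨ (PySem.Int.mod x 2 ≠ 0 ∧ x < 0) then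
    let r := r + 6
    if x > 0 then r + 7 * PySem.Int.floordiv x 5 + 8 * PySem.Int.floordiv x 7 else r
  else r

def pvTailB (r : Int) : Int :=
  let r := if r < 0 then 0 else if r = 0 then 1 else r
  let r := (r + 1) * 3
  if r > 100 then PySem.Int.floordiv r 2
  else if r > 50 then PySem.Int.floordiv r 3
  else if r > 20 then PySem.Int.floordiv r 4
  else r + 10

def complex_calculation_alt (x : Int) : Int := pvTailB (pvHeadB x)

-- ===== PRECONDITION & SPEC =====
def Spec_complex_calculation (x : Int) (out : Int) : Prop := out = complex_calculation_alt x
instance (x : Int) (out : Int) : Decidable (Spec_complex_calculation x out) := by unfold Spec_complex_calculation; infer_instance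

-- ===== CLAIM (what is proved, stated in full; the proofs are below) =====
def Claim_equal_complex_calculation : Prop := ∀ (x : Int), Dom_complex_calculation x → Spec_complex_calculation x (complex_calculation x)

-- ===== LEMMAS AND PROOFS =====
theorem pvWhileA_nonpos (x r : Int) (h : ¬ x > 0) : pvWhileA x r = r := by
  unfold pvWhileA; simp [h]

theorem pvWhileA_closed_nat (n : Nat) : ∀ r : Int,
    pvWhileA (n : Int) r = r + 7 * PySem.Int.floordiv (n : Int) 5 + 8 * PySem.Int.floordiv (n : Int) 7 := by
  induction n with
  | zero => intro r; rw [pvWhileA_nonpos _ _ (by omega)]; simp [PySem.Int.floordiv]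
  | succ n ih =>
    intro r
    have hcast : ((n + 1 : Nat) : Int) - 1 = (n : Int) := by push_cast; ring
    unfold pvWhileA
    rw [if_pos (by push_cast; omega), hcast]
    simp only [ih]
    rw [PySem.Int.mod_eq_emod_of_pos (by norm_num : (0:Int) < 5),
        PySem.Int.mod_eq_emod_of_pos (by norm_num : (0:Int) < 7)]
    simp only [PySem.Int.floordiv_eq_ediv_of_pos (by norm_num : (0:Int) < 5),
        PySem.Int.floordiv_eq_ediv_of_pos (by norm_num : (0:Int) < 7)]
    split_ifs <;> push_cast at * <;> omega

theorem pvWhileA_closed (x r : Int) (h : 0 ≤ x) :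
    pvWhileA x r = r + 7 * PySem.Int.floordiv x 5 + 8 * PySem.Int.floordiv x 7 := by
  have hx : x = ((x.toNat : Nat) : Int) := by omega
  rw [hx]; exact pvWhileA_closed_nat x.toNat r

theorem head_eq (x : Int) : pvHeadA x = pvHeadB x := by
  unfold pvHeadA pvHeadB
  rw [show PySem.List.pyRange 0 3 1 = [0, 1, 2] from by decide]
  simp only [List.foldl]
  norm_num
  by_cases hx : 0 < x
  · rw [pvWhileA_closed x _ (le_of_lt hx)]
    simp only [PySem.Int.floordiv_eq_ediv_of_pos (show (0:Int) < 5 from by norm_num),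
        PySem.Int.floordiv_eq_ediv_of_pos (show (0:Int) < 7 from by norm_num)]
    split_ifs <;> omega
  · rw [pvWhileA_nonpos x _ hx]
    split_ifs <;> omega

theorem tail_eq (r : Int) : pvTailA r = pvTailB r := by
  unfold pvTailA pvTailB
  rw [show PySem.List.pyRange 0 4 1 = [0, 1, 2, 3] from by decide]
  simp only [List.foldl,
      show PySem.Int.mod (0 : Int) 2 = 0 from by decide,
      show PySem.Int.mod (1 : Int) 2 = 1 from by decide,
      show PySem.Int.mod (2 : Int) 2 = 0 from by decide,
      show PySem.Int.mod (3 : Int) 2 = 1 from by decide]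
  norm_num [PySem.Int.floordiv_eq_ediv_of_pos (show (0:Int) < 2 from by norm_num),
      PySem.Int.floordiv_eq_ediv_of_pos (show (0:Int) < 3 from by norm_num),
      PySem.Int.floordiv_eq_ediv_of_pos (show (0:Int) < 4 from by norm_num)]
  split_ifs <;> omega

-- ===== VERDICT (by name: the statement is the Claim_ definition above) =====
theorem complex_calculation_spec : Claim_equal_complex_calculation := by
  intro x _
  unfold Spec_complex_calculation complex_calculation complex_calculation_alt
  rw [head_eq, tail_eq]
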